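-- pv_equiv track=rewrite | github.com/Try4646/BlockBlastSolver | AlgoClass.py | clear_completed_lines
-- ===== SOURCE A (Python) =====
-- def clear_completed_lines(grid):
--     new_grid = [row[:] for row in grid]
--     full_rows = [idx for idx, row in enumerate(new_grid) if all(cell != 0 for cell in row)]
--     full_cols = [idx for idx in range(len(new_grid[0])) if all(new_grid[row][idx] != 0 for row in range(len(new_grid)))]
--
--     for row_idx in full_rows:
--         for col_idx in range(len(new_grid[row_idx])):
--             new_grid[row_idx][col_idx] = 0
--
--     for col_idx in full_cols:
--         for row_idx in range(len(new_grid)):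
--             new_grid[row_idx][col_idx] = 0
--
--     return new_grid, full_rows, full_cols
-- ===== SOURCE B (Python) =====
-- def clear_completed_lines(grid):
--     full_rows = [idx for idx, row in enumerate(grid) if all(cell != 0 for cell in row)]
--     full_cols = [idx for idx in range(len(grid[0])) if all(grid[row][idx] != 0 for row in range(len(grid)))]
--     rowset, colset = set(full_rows), set(full_cols)
--     new_grid = [[0 if r in rowset or c in colset else v for c, v in enumerate(row)]
--                 for r, row in enumerate(grid)]
--     return new_grid, full_rows, full_cols
-- ===== Notes on version B (the rewrite author's own statement) =====
-- stated objective: simpler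
-- what changed: B keeps A's full-row/full-column detection but replaces A's copy-then-mutate clearing (two nested in-place assignment loops over the copied grid) with a single comprehension that rebuilds the grid, emitting 0 wherever the row or column index is in the full-line sets.
import Mathlib
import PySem

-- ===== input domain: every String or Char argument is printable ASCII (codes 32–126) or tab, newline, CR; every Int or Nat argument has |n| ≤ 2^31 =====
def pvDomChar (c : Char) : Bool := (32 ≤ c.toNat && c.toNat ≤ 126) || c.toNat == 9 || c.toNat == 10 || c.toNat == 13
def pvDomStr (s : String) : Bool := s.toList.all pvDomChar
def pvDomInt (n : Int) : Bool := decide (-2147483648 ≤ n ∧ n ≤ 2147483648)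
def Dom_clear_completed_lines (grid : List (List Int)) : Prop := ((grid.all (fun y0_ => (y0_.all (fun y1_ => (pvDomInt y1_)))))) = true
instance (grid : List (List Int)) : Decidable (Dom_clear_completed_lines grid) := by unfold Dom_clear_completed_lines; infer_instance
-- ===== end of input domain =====

-- B rebuilds the cleared grid in one comprehension pass from the full-row/full-column sets
-- instead of copying the grid and mutating the cleared lines in place (objective: simpler).

-- ===== PORT A =====
-- A's code, step for step: copy, detect full rows/cols, then two nested mutation loops
-- (in-place assignment new_grid[r][c] = 0 becomes List.set on the persistent grid).
def clear_completed_lines (grid : List (List Int)) : List (List Int) × List Int × List Int :=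
  let new_grid := grid.map (fun row => row)       -- [row[:] for row in grid]
  let full_rowsN := (List.range new_grid.length).filter
      (fun i => (new_grid.getD i []).all (fun c => c != 0))
  let full_colsN := (List.range new_grid.headI.length).filter
      (fun j => (List.range new_grid.length).all (fun r => (new_grid.getD r []).getD j 0 != 0))
  let g1 := full_rowsN.foldl (fun g ri =>
      (List.range (g.getD ri []).length).foldl
        (fun g' ci => g'.set ri ((g'.getD ri []).set ci 0)) g) new_grid
  let g2 := full_colsN.foldl (fun g ci =>
      (List.range g.length).foldl
        (fun g' ri => g'.set ri ((g'.getD ri []).set ci 0)) g) g1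
  (g2, full_rowsN.map Int.ofNat, full_colsN.map Int.ofNat)

-- ===== PORT B =====
-- B's code: same detection, then sets rowset/colset and one comprehension building new_grid.
def clear_completed_lines_alt (grid : List (List Int)) : List (List Int) × List Int × List Int :=
  let full_rowsN := (List.range grid.length).filter
      (fun i => (grid.getD i []).all (fun c => c != 0))
  let full_colsN := (List.range grid.headI.length).filter
      (fun j => (List.range grid.length).all (fun r => (grid.getD r []).getD j 0 != 0))
  let rowset := PySem.Set.ofList full_rowsN
  let colset := PySem.Set.ofList full_colsN
  let new_grid := grid.zipIdx.map (fun p =>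
      p.1.zipIdx.map (fun q => if rowset.contains p.2 || colset.contains q.2 then 0 else q.1))
  (new_grid, full_rowsN.map Int.ofNat, full_colsN.map Int.ofNat)

-- ===== PRECONDITION & SPEC =====
-- Pre_ excludes exactly the inputs where Python A raises IndexError: the empty grid
-- (grid[0]), and ragged grids where the full_cols generator reaches a row shorter than
-- column j before hitting a zero cell (short-circuit of all()).  B raises there too.
def Pre_clear_completed_lines (grid : List (List Int)) : Prop :=
  grid ≠ [] ∧
  ∀ j < grid.headI.length, ∀ r < grid.length, (grid.getD r []).length ≤ j →
    ∃ r' < r, (grid.getD r' []).length ≤ j ∨ (grid.getD r' []).getD j 0 = 0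
instance (grid : List (List Int)) : Decidable (Pre_clear_completed_lines grid) := by
  unfold Pre_clear_completed_lines; infer_instance
def pvWitness_clear_completed_lines : List (List Int) := [[1, 0], [2, 3]]
def Spec_clear_completed_lines (grid : List (List Int)) (out : List (List Int) × List Int × List Int) : Prop := out = clear_completed_lines_alt grid
instance (grid : List (List Int)) (out : List (List Int) × List Int × List Int) : Decidable (Spec_clear_completed_lines grid out) := by unfold Spec_clear_completed_lines; infer_instance

-- ===== CLAIM (what is proved, stated in full; the proofs are below) =====
def Claim_equal_clear_completed_lines : Prop := ∀ (grid : List (List Int)), Dom_clear_completed_lines grid → Pre_clear_completed_lines grid → Spec_clear_completed_lines grid (clear_completed_lines grid)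

-- ===== LEMMAS AND PROOFS =====

-- the grid-level fold that zeroes the cells of row r factors through that row
theorem fold_set_row (l : List Nat) (g : List (List Int)) (r : Nat) (hr : r < g.length) :
    l.foldl (fun g' ci => g'.set r ((g'.getD r []).set ci 0)) g
      = g.set r (l.foldl (fun row ci => row.set ci 0) (g.getD r [])) := by
  induction l generalizing g with
  | nil =>
      simp only [List.foldl_nil]
      rw [List.getD_eq_getElem?_getD, List.getElem?_eq_getElem hr]
      exact (List.set_getElem_self hr).symm
  | cons a l ih =>
      simp only [List.foldl_cons]
      rw [ih _ (by simpa using hr)]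
      rw [List.set_set]
      congr 1
      rw [List.getD_eq_getElem?_getD, List.getElem?_set_self' ]
      simp [hr, List.getD_eq_getElem?_getD]

-- zeroing the first n cells of a row by successive set
theorem fold_zero_prefix (row : List Int) (n : Nat) (hn : n ≤ row.length) :
    (List.range n).foldl (fun r ci => r.set ci 0) row
      = List.replicate n 0 ++ row.drop n := by
  induction n with
  | zero => simp
  | succ n ih =>
      rw [List.range_succ, List.foldl_append, ih (Nat.le_of_succ_le hn)]
      have hlt : n < row.length := hn
      simp only [List.foldl_cons, List.foldl_nil]
      rw [List.set_append]
      simp only [List.length_replicate, lt_irrefl, if_false, Nat.sub_self]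
      rw [List.drop_eq_getElem_cons hlt, List.set_cons_zero]
      rw [List.replicate_succ' ]
      simp

theorem fold_zero_row (row : List Int) :
    (List.range row.length).foldl (fun r ci => r.set ci 0) row
      = List.replicate row.length 0 := by
  rw [fold_zero_prefix row row.length (le_refl _)]
  simp

-- row-clearing loop, pointwise characterisation
theorem rowloop_getElem? (F : List Nat) (g : List (List Int)) (i : Nat)
    (hF : ∀ r ∈ F, r < g.length) :
    (F.foldl (fun g ri =>
        (List.range (g.getD ri []).length).foldl
          (fun g' ci => g'.set ri ((g'.getD ri []).set ci 0)) g) g)[i]?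
      = if i ∈ F then g[i]?.map (fun row => List.replicate row.length 0) else g[i]? := by
  induction F generalizing g with
  | nil => simp
  | cons r F ih =>
      have hr : r < g.length := hF r (by simp)
      simp only [List.foldl_cons]
      rw [fold_set_row _ _ _ hr]
      have hrowD : g.getD r [] = g[r] := by
        simp [List.getD_eq_getElem?_getD, List.getElem?_eq_getElem hr]
      rw [hrowD, fold_zero_row]
      rw [ih _ (by intro x hx; simpa using hF x (List.mem_cons_of_mem _ hx))]
      by_cases hiF : i ∈ F
      · simp only [List.mem_cons, hiF, or_true, if_true]
        by_cases hir : i = r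
        · subst hir
          rw [List.getElem?_set_self' ]
          simp [List.getElem?_eq_getElem hr]
        · rw [List.getElem?_set_ne (fun h => hir h.symm)]
      · by_cases hir : i = r
        · subst hir
          simp only [List.mem_cons, true_or, if_true, hiF, if_false]
          rw [List.getElem?_set_self' ]
          simp [List.getElem?_eq_getElem hr]
        · simp only [List.mem_cons, hiF, hir, or_self, if_false]
          rw [List.getElem?_set_ne (fun h => hir h.symm)]

-- one column pass over all rows = map over the rows
theorem colpass_range' (c : Nat) : ∀ (n k : Nat) (g : List (List Int)), k + n = g.length →
    (List.range' k n).foldl (fun g' ri => g'.set ri ((g'.getD ri []).set c 0)) g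
      = g.take k ++ (g.drop k).map (fun row => row.set c 0) := by
  intro n
  induction n with
  | zero =>
      intro k g hk
      have hkg : k = g.length := by omega
      subst hkg
      simp
  | succ n ih =>
      intro k g hk
      have hklt : k < g.length := by omega
      rw [List.range'_succ, List.foldl_cons]
      have hrowD : g.getD k [] = g[k] := by
        simp [List.getD_eq_getElem?_getD, List.getElem?_eq_getElem hklt]
      rw [hrowD, ih (k+1) _ (by simpa using by omega)]
      rw [List.take_set, List.drop_set_of_lt (by omega)]
      rw [List.take_add_one, List.getElem?_eq_getElem hklt]
      simp only [Option.toList_some]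
      rw [List.set_append]
      simp only [List.length_take, Nat.min_eq_left (Nat.le_of_lt hklt), lt_irrefl, if_false,
        Nat.sub_self, List.set_cons_zero]
      conv_rhs => rw [List.drop_eq_getElem_cons hklt]
      simp
      rw [List.drop_eq_getElem_cons (show k < (List.map (fun row => row.set c 0) g).length by simpa using hklt)]
      simp

theorem colpass (c : Nat) (g : List (List Int)) :
    (List.range g.length).foldl (fun g' ri => g'.set ri ((g'.getD ri []).set c 0)) g
      = g.map (fun row => row.set c 0) := by
  rw [List.range_eq_range', colpass_range' c g.length 0 g (by simp)]
  simp

-- the whole column loop = map with a row-level fold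
theorem colloop_map (C : List Nat) (g : List (List Int)) :
    (C.foldl (fun g ci =>
        (List.range g.length).foldl
          (fun g' ri => g'.set ri ((g'.getD ri []).set ci 0)) g) g)
      = g.map (fun row => C.foldl (fun r ci => r.set ci 0) row) := by
  induction C generalizing g with
  | nil => simp
  | cons c C ih =>
      simp only [List.foldl_cons]
      rw [colpass, ih, List.map_map]
      rfl

-- row-level column zeroing, pointwise
theorem rowset_getElem? (C : List Nat) (row : List Int) (j : Nat) :
    (C.foldl (fun r ci => r.set ci 0) row)[j]?
      = if j ∈ C then row[j]?.map (fun _ => (0 : Int)) else row[j]? := by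
  induction C generalizing row with
  | nil => simp
  | cons c C ih =>
      simp only [List.foldl_cons]
      rw [ih]
      by_cases hjC : j ∈ C
      · simp only [List.mem_cons, hjC, or_true, if_true]
        by_cases hjc : j = c
        · subst hjc
          rw [List.getElem?_set_self' ]
          cases h : row[j]? <;> simp
        · rw [List.getElem?_set_ne (fun h => hjc h.symm)]
      · by_cases hjc : j = c
        · subst hjc
          simp only [List.mem_cons, true_or, if_true, hjC, if_false]
          rw [List.getElem?_set_self' ]
          cases h : row[j]? <;> simp
        · simp only [List.mem_cons, hjC, hjc, or_self, if_false]
          rw [List.getElem?_set_ne (fun h => hjc h.symm)]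

-- combining everything: A's two mutation loops equal B's comprehension grid
theorem grids_eq (grid : List (List Int)) (F C : List Nat) (hF : ∀ r ∈ F, r < grid.length) :
    (C.foldl (fun g ci =>
        (List.range g.length).foldl (fun g' ri => g'.set ri ((g'.getD ri []).set ci 0)) g)
      (F.foldl (fun g ri =>
        (List.range (g.getD ri []).length).foldl (fun g' ci => g'.set ri ((g'.getD ri []).set ci 0)) g) grid))
    = grid.zipIdx.map (fun p => p.1.zipIdx.map (fun q =>
        if (PySem.Set.ofList F).contains p.2 || (PySem.Set.ofList C).contains q.2 then 0 else q.1)) := by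
  rw [colloop_map]
  apply List.ext_getElem?
  intro i
  rw [List.getElem?_map, rowloop_getElem? F grid i hF, List.getElem?_map, List.getElem?_zipIdx]
  cases hrow : grid[i]? with
  | none => by_cases hiF : i ∈ F <;> simp [hiF]
  | some row =>
      by_cases hiF : i ∈ F
      · simp only [hiF, if_true, Option.map_some]
        congr 1
        apply List.ext_getElem?
        intro j
        rw [rowset_getElem?, List.getElem?_map, List.getElem?_zipIdx]
        have hcF : (PySem.Set.ofList F).contains i = true := by
          simp [PySem.Set.contains, hiF]
        by_cases hj : j < row.length
        · simp [List.getElem?_replicate, hj, hcF, List.getElem?_eq_getElem hj]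
          intro hf _
          exact absurd hiF hf
        · simp [List.getElem?_replicate, hj, List.getElem?_eq_none (show row.length ≤ j by omega)]
      · simp only [hiF, if_false, Option.map_some]
        congr 1
        apply List.ext_getElem?
        intro j
        rw [rowset_getElem?, List.getElem?_map, List.getElem?_zipIdx]
        have hcF : (PySem.Set.ofList F).contains i = false := by
          simp [PySem.Set.contains, hiF]
        by_cases hjC : j ∈ C
        · have hcC : (PySem.Set.ofList C).contains j = true := by
            simp [PySem.Set.contains, hjC]
          cases h : row[j]? <;> simp [hjC, hcF, hcC, h]
        · have hcC : (PySem.Set.ofList C).contains j = false := by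
            simp [PySem.Set.contains, hjC]
          cases h : row[j]? <;> simp [hjC, hcF, h]
          intro hf
          exact absurd hf hiF

-- ===== VERDICT (by name: the statement is the Claim_ definition above) =====
theorem clear_completed_lines_spec : Claim_equal_clear_completed_lines := by
  intro grid _ _
  unfold Spec_clear_completed_lines clear_completed_lines clear_completed_lines_alt
  simp only [List.map_id']
  rw [grids_eq]
  intro r hr
  simp only [List.mem_filter, List.mem_range] at hr
  exact hr.1
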